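-- pv_equiv track=rewrite | github.com/SvaOg/lc-data-structures-and-algorithms | problems/hasing/problem_3005.py | maxFrequencyElements2
-- ===== SOURCE A (Python) =====
-- from collections import Counter, defaultdict
-- from typing import List
--
-- def maxFrequencyElements2(nums: List[int]) -> int:
--     sum = 0
--
--     freq = sorted(Counter(nums).values(), reverse=True)
--     f1 = freq[0]
--
--     for n in freq:
--         if n != f1:
--             break
--         sum += n
--
--     return sum
-- ===== SOURCE B (Python) =====
-- def maxFrequencyElements2(nums):
--     s = sorted(nums)
--     runs = []
--     prev = s[0]
--     cnt = 0
--     for x in s: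
--         if x == prev:
--             cnt += 1
--         else:
--             runs.append(cnt)
--             prev = x
--             cnt = 1
--     runs.append(cnt)
--     m = max(runs)
--     return m * runs.count(m)
-- ===== Notes on version B (the rewrite author's own statement) =====
-- stated objective: alternative
-- what changed: B derives the frequency multiset by sorting nums and run-length-grouping consecutive equal values in one pass, then returns max run length times the number of maximal runs, instead of A's Counter hashing plus descending sort of the frequency values with a break-at-first-smaller summation loop.
import Mathlib
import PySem

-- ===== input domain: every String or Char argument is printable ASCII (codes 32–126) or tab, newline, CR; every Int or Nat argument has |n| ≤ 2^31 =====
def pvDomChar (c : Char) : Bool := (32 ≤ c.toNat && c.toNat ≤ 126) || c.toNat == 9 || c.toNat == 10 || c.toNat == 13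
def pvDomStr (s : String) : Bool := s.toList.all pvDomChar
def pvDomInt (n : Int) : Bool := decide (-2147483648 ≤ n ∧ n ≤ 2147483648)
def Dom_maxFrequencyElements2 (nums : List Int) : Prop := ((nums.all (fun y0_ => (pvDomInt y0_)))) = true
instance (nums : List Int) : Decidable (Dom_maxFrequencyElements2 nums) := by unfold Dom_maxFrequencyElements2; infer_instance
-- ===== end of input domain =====

-- B replaces A's Counter-then-descending-sort-then-break-loop by sorting nums and run-length
-- grouping consecutive equal values in one pass (objective: alternative, same asymptotic cost).

-- ===== PORT A =====
-- 'for n in freq: if n != f1: break; sum += n'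
def pvALoop (f1 : Int) : List Int → Int → Int
  | [], s => s
  | n :: t, s => if n ≠ f1 then s else pvALoop f1 t (s + n)

def maxFrequencyElements2 (nums : List Int) : Int :=
  let freq := PySem.List.sorted (PySem.Dict.counter nums).values (fun v => v) true
  match PySem.List.pyGet? freq 0 with
  | none => 0            -- freq[0] raises IndexError on empty nums; excluded by Pre_
  | some f1 => pvALoop f1 freq 0

-- ===== PORT B =====
-- the grouping scan over the sorted list: state (prev, cnt, runs)
def pvBScan : List Int → Int → Int → List Int → List Int
  | [], _, cnt, runs => runs ++ [cnt]
  | x :: t, prev, cnt, runs =>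
      if x = prev then pvBScan t prev (cnt + 1) runs
      else pvBScan t x 1 (runs ++ [cnt])

def maxFrequencyElements2_alt (nums : List Int) : Int :=
  let s := PySem.List.sorted nums (fun v => v) false
  match PySem.List.pyGet? s 0 with
  | none => 0            -- s[0] raises IndexError on empty nums; excluded by Pre_
  | some p =>
      let runs := pvBScan s p 0 []
      match PySem.List.max? runs (fun v => v) with
      | none => 0        -- unreachable: runs is nonempty
      | some m => m * (PySem.List.count runs m : Int)

-- ===== PRECONDITION & SPEC =====
-- Pre_ excludes exactly the empty list, on which A raises IndexError (freq[0]); B raises there too.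
def Pre_maxFrequencyElements2 (nums : List Int) : Prop := nums ≠ []
instance (nums : List Int) : Decidable (Pre_maxFrequencyElements2 nums) := by unfold Pre_maxFrequencyElements2; infer_instance
def pvWitness_maxFrequencyElements2 : List Int := [1, 2, 2, 3, 1, 4]

def Spec_maxFrequencyElements2 (nums : List Int) (out : Int) : Prop := out = maxFrequencyElements2_alt nums
instance (nums : List Int) (out : Int) : Decidable (Spec_maxFrequencyElements2 nums out) := by unfold Spec_maxFrequencyElements2; infer_instance

-- ===== CLAIM (what is proved, stated in full; the proofs are below) =====
def Claim_equal_maxFrequencyElements2 : Prop := ∀ (nums : List Int), Dom_maxFrequencyElements2 nums → Pre_maxFrequencyElements2 nums → Spec_maxFrequencyElements2 nums (maxFrequencyElements2 nums)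

-- ===== LEMMAS AND PROOFS =====

-- pure run-length list of l: the head's multiplicity, then the runs of the rest
def pvRlenc : List Int → List Int
  | [] => []
  | x :: t => (1 + (t.count x : Int)) :: pvRlenc (t.filter (fun y => y ≠ x))
termination_by l => l.length
decreasing_by
  simp only [List.length_cons, Nat.lt_succ_iff, List.length_unattach,
    le_trans (List.length_filter_le _ _) (le_of_eq (List.length_attach))]

-- A's break-loop on a descending list headed (≥-bounded) by f1 sums the f1-prefix
theorem pvALoop_eq (f1 : Int) (l : List Int) (acc : Int)
    (hp : l.Pairwise (fun a b => b ≤ a)) (hb : ∀ y ∈ l, y ≤ f1) :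
    pvALoop f1 l acc = acc + f1 * (l.count f1 : Int) := by
  induction l generalizing acc with
  | nil => simp [pvALoop]
  | cons n t ih =>
    rcases List.pairwise_cons.mp hp with ⟨hn, ht⟩
    by_cases h : n = f1
    · subst h
      rw [pvALoop]
      simp only [ne_eq, not_true_eq_false, if_false]
      rw [ih (acc + n) ht (fun y hy => hn y hy)]
      rw [List.count_cons_self]
      push_cast
      ring
    · have hne : f1 ∉ n :: t := by
        intro hf
        rcases List.mem_cons.mp hf with h1 | h1
        · exact h h1.symm
        · exact h (le_antisymm (hb n (List.mem_cons_self)) (hn f1 h1))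
      rw [pvALoop]
      simp [h, List.count_eq_zero.mpr hne]

theorem pvRlenc_cons (x : Int) (t : List Int) :
    pvRlenc (x :: t) = (1 + (t.count x : Int)) :: pvRlenc (t.filter (fun y => y ≠ x)) := by
  rw [pvRlenc.eq_def]

-- the scan computes runs ++ (cnt + multiplicity of prev) :: runs-of-the-rest, on a sorted tail
theorem pvBScan_eq (l : List Int) (prev cnt : Int) (runs : List Int)
    (hs : l.Pairwise (fun a b => a ≤ b)) (hmin : ∀ y ∈ l, prev ≤ y) :
    pvBScan l prev cnt runs
      = runs ++ (cnt + (l.count prev : Int)) :: pvRlenc (l.filter (fun y => y ≠ prev)) := by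
  induction l generalizing prev cnt runs with
  | nil => simp [pvBScan, pvRlenc]
  | cons x t ih =>
    rcases List.pairwise_cons.mp hs with ⟨hx, ht⟩
    by_cases h : x = prev
    · subst h
      rw [pvBScan]
      rw [if_pos rfl]
      rw [ih x (cnt + 1) runs ht hx]
      rw [List.count_cons_self, List.filter_cons_of_neg (by simp)]
      push_cast
      ring_nf
    · have hpx : prev < x := lt_of_le_of_ne (hmin x List.mem_cons_self) (fun e => h e.symm)
      have hnp : prev ∉ x :: t := by
        intro hf
        rcases List.mem_cons.mp hf with h1 | h1
        · exact absurd h1.symm (ne_of_gt hpx)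
        · exact absurd rfl (ne_of_gt (lt_of_lt_of_le hpx (hx prev h1)))
      have hfil : (x :: t).filter (fun y => y ≠ prev) = x :: t := by
        apply List.filter_eq_self.mpr
        intro y hy
        simp only [ne_eq, decide_eq_true_eq]
        intro e
        rw [e] at hy
        exact hnp hy
      rw [pvBScan]
      simp only [if_neg h]
      rw [ih x 1 (runs ++ [cnt]) ht hx]
      rw [List.count_eq_zero.mpr hnp, hfil, pvRlenc_cons]
      simp

-- run lengths are (as a multiset) the multiplicities of the distinct elements
theorem pvRlenc_perm_aux (n : Nat) : ∀ (l : List Int), l.length ≤ n →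
    (pvRlenc l).Perm ((PySem.Set.ofList l).map (fun k => (l.count k : Int))) := by
  induction n with
  | zero =>
    intro l hl
    rw [List.length_eq_zero_iff.mp (Nat.le_zero.mp hl)]
    simp [pvRlenc]
  | succ n ih =>
    intro l hl
    cases l with
    | nil => simp [pvRlenc]
    | cons x t =>
      rw [pvRlenc_cons, PySem.Set.ofList_cons, List.map_cons, List.count_cons_self]
      have ihf := ih (t.filter (fun y => y ≠ x))
        (le_trans (List.length_filter_le _ _) (by simpa using hl))
      have hmap : ((PySem.Set.ofList (t.filter (fun y => y ≠ x))).map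
            (fun k => ((t.filter (fun y => y ≠ x)).count k : Int)))
          = ((PySem.Set.ofList (t.filter (fun y => y ≠ x))).map
            (fun k => ((x :: t).count k : Int))) := by
        apply List.map_congr_left
        intro k hk
        have hkt := List.mem_filter.mp ((PySem.Set.mem_ofList _ _).mp hk)
        have hne : k ≠ x := by simpa using hkt.2
        rw [List.count_filter (by simpa using hne), List.count_cons_of_ne (fun e => hne e.symm)]
      have hperm : (PySem.Set.ofList (t.filter (fun y => y ≠ x))).Perm
          ((PySem.Set.ofList t).discard x) := by
        rw [List.perm_ext_iff_of_nodup (PySem.Set.nodup_ofList _)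
            (PySem.Set.nodup_discard _ _ (PySem.Set.nodup_ofList _))]
        intro a
        rw [PySem.Set.mem_ofList, PySem.Set.mem_discard, PySem.Set.mem_ofList, List.mem_filter]
        simp
      have htail : (pvRlenc (t.filter (fun y => y ≠ x))).Perm
          (((PySem.Set.ofList t).discard x).map (fun k => ((x :: t).count k : Int))) := by
        refine ihf.trans ?_
        rw [hmap]
        exact hperm.map _
      have hhead : 1 + (t.count x : Int) = ((t.count x : Nat) + 1 : Nat) := by push_cast; ring
      rw [hhead]
      exact List.Perm.cons _ htail

theorem pvRlenc_perm (l : List Int) :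
    (pvRlenc l).Perm ((PySem.Set.ofList l).map (fun k => (l.count k : Int))) :=
  pvRlenc_perm_aux l.length l le_rfl

-- ===== VERDICT (by name: the statement is the Claim_ definition above) =====
theorem maxFrequencyElements2_spec : Claim_equal_maxFrequencyElements2 := by
  intro nums _ hne
  unfold Spec_maxFrequencyElements2
  -- the frequency values of the Counter
  have hvals : (PySem.Dict.counter nums).values
      = (PySem.Set.ofList nums).map (fun k => (List.count k nums : Int)) := by
    simp only [PySem.Dict.values, PySem.Dict.items_counter, List.map_map]
    rfl
  set vals : List Int := (PySem.Set.ofList nums).map (fun k => (List.count k nums : Int)) with hv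
  have hvne : vals ≠ [] := by
    cases nums with
    | nil => exact absurd rfl hne
    | cons a b => simp [hv, PySem.Set.ofList_cons]
  -- A side
  set freq : List Int := PySem.List.sorted vals (fun v => v) true with hfq
  have hfne : freq ≠ [] := fun h => hvne ((PySem.List.sorted_eq_nil_iff _ _ _).mp h)
  obtain ⟨f1, ft, hfc⟩ := List.exists_cons_of_ne_nil hfne
  have hfb : ∀ y ∈ vals, y ≤ f1 := PySem.List.key_head_sorted_rev_ge vals (fun v => v) hfc
  have hfb' : ∀ y ∈ freq, y ≤ f1 := fun y hy =>
    hfb y ((PySem.List.mem_sorted _ _ _ _).mp hy)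
  have hf1v : f1 ∈ vals := (PySem.List.mem_sorted _ _ _ _).mp (hfc ▸ List.mem_cons_self)
  have hA : pvALoop f1 freq 0 = f1 * (vals.count f1 : Int) := by
    rw [pvALoop_eq f1 freq 0 (PySem.List.sorted_pairwise_rev vals (fun v => v)) hfb']
    rw [List.Perm.count_eq (PySem.List.sorted_perm vals (fun v => v) true)]
    ring
  -- B side
  set s : List Int := PySem.List.sorted nums (fun v => v) false with hsq
  have hsne : s ≠ [] := fun h => hne ((PySem.List.sorted_eq_nil_iff _ _ _).mp h)
  obtain ⟨p, st, hsc⟩ := List.exists_cons_of_ne_nil hsne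
  have hsp : s.Perm nums := PySem.List.sorted_perm nums (fun v => v) false
  have hruns : pvBScan s p 0 [] = pvRlenc s := by
    rw [pvBScan_eq s p 0 [] (PySem.List.sorted_pairwise nums (fun v => v))
      (fun y hy => PySem.List.key_head_sorted_le nums (fun v => v) hsc y
        ((PySem.List.mem_sorted _ _ _ _).mp hy))]
    rw [hsc, pvRlenc_cons, List.count_cons_self, List.filter_cons_of_neg (by simp)]
    simp only [List.nil_append, List.cons.injEq, and_true]
    push_cast
    ring
  -- runs is a permutation of vals
  have hperm : (pvRlenc s).Perm vals := by
    refine (pvRlenc_perm s).trans ?_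
    have hcnt : ((PySem.Set.ofList s).map (fun k => (List.count k s : Int)))
        = ((PySem.Set.ofList s).map (fun k => (List.count k nums : Int))) :=
      List.map_congr_left (fun k _ => by rw [hsp.count_eq])
    rw [hcnt, hv]
    refine List.Perm.map _ ?_
    rw [List.perm_ext_iff_of_nodup (PySem.Set.nodup_ofList _) (PySem.Set.nodup_ofList _)]
    intro a
    rw [PySem.Set.mem_ofList, PySem.Set.mem_ofList]
    exact hsp.mem_iff
  have hrne : pvRlenc s ≠ [] := by
    rw [hsc, pvRlenc_cons]
    exact List.cons_ne_nil _ _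
  -- the maximum of runs is f1
  obtain ⟨m, hm⟩ : ∃ m, PySem.List.max? (pvRlenc s) (fun v => v) = some m := by
    cases hmm : PySem.List.max? (pvRlenc s) (fun v => v) with
    | none => exact absurd ((PySem.List.max?_eq_none_iff _ _).mp hmm) hrne
    | some m => exact ⟨m, rfl⟩
  have hmruns : m ∈ pvRlenc s := PySem.List.max?_mem hm
  have hmax : ∀ y ∈ pvRlenc s, y ≤ m := PySem.List.max?_isMax hm
  have hmf1 : m = f1 :=
    le_antisymm (hfb m (hperm.mem_iff.mp hmruns)) (hmax f1 (hperm.mem_iff.mpr hf1v))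
  -- assemble
  have h0 : PySem.List.pyGet? freq 0 = some f1 := by
    rw [hfc]; exact PySem.List.pyGet?_zero_cons _ _
  have h1 : PySem.List.pyGet? s 0 = some p := by
    rw [hsc]; exact PySem.List.pyGet?_zero_cons _ _
  have hEA : maxFrequencyElements2 nums = pvALoop f1 freq 0 := by
    simp only [maxFrequencyElements2, hvals, ← hfq, h0]
  have hEB : maxFrequencyElements2_alt nums = m * (PySem.List.count (pvRlenc s) m : Int) := by
    simp only [maxFrequencyElements2_alt, ← hsq, h1, hruns, hm]
  rw [hEA, hEB, hA, hmf1, PySem.List.count_eq, hperm.count_eq]
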